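-- pv_equiv track=rewrite | github.com/cuber17/my_mmllm | tools/remap_attribute_labels.py | build_label_maps
-- ===== SOURCE A (Python) =====
-- TARGET_LABEL_ORDER = {
--     'action_category': ['locomotion', 'gesture', 'exercise', 'transition'],
--     'posture': ['upright', 'low_posture', 'crouching', 'bending'],
--     'intensity': ['slow', 'normal', 'vigorous'],
--     'active_part': ['full_body', 'upper_body', 'lower_body'],
--     'trajectory': ['in_place', 'forwards', 'backwards', 'lateral_move', 'dynamic_turn'],
-- }
--
-- TASKS = ['action_category', 'posture', 'intensity', 'active_part', 'trajectory']
--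
-- def normalize_label(value):
--     if not isinstance(value, str):
--         return ''
--     return value.lower().strip()
--
-- def build_label_maps(items):
--     label_maps = {}
--     for task in TASKS:
--         observed = []
--         seen = set()
--         for item in items:
--             label = normalize_label(item.get('labels', {}).get(task, ''))
--             if label and label not in seen:
--                 seen.add(label)
--                 observed.append(label)
--
--         ordered = [label for label in TARGET_LABEL_ORDER[task] if label in seen]
--         extras = [label for label in observed if label not in ordered]
--         final_labels = ordered + extras
--         label_maps[task] = {label: idx for idx, label in enumerate(final_labels)}
--     return label_maps
-- ===== SOURCE B (Python) =====
-- TARGET_LABEL_ORDER = {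
--     'action_category': ['locomotion', 'gesture', 'exercise', 'transition'],
--     'posture': ['upright', 'low_posture', 'crouching', 'bending'],
--     'intensity': ['slow', 'normal', 'vigorous'],
--     'active_part': ['full_body', 'upper_body', 'lower_body'],
--     'trajectory': ['in_place', 'forwards', 'backwards', 'lateral_move', 'dynamic_turn'],
-- }
--
-- TASKS = ['action_category', 'posture', 'intensity', 'active_part', 'trajectory']
--
-- def normalize_label(value):
--     if not isinstance(value, str):
--         return ''
--     return value.lower().strip()
--
-- def build_label_maps(items):
--     # One pass over items records, per task, each label's FIRST occurrence position.
--     first = {task: {} for task in TASKS}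
--     for pos, item in enumerate(items):
--         labels = item.get('labels', {})
--         for task in TASKS:
--             label = normalize_label(labels.get(task, ''))
--             if label and label not in first[task]:
--                 first[task][label] = pos
--     # Per task, ORDER BY an integer sort key instead of staged filtering/concatenation:
--     # canonical labels get their rank in TARGET_LABEL_ORDER, extras get
--     # len(order) + first-occurrence position (so all extras come after, in first-seen order).
--     label_maps = {}
--     for task in TASKS:
--         order = TARGET_LABEL_ORDER[task]
--         fp = first[task]
--         final = sorted(fp, key=lambda l: order.index(l) if l in order else len(order) + fp[l])
--         label_maps[task] = {l: i for i, l in enumerate(final)}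
--     return label_maps
-- ===== Notes on version B (the rewrite author's own statement) =====
-- stated objective: alternative
-- what changed: A makes a per-task scan of items and then builds each map by staged filtering (canonical labels present, then extras) and concatenation; B makes one enumerated pass over items recording each label's first-occurrence position per task, and then ORDERS each task's labels by a computed integer sort key (rank in TARGET_LABEL_ORDER, or len(order)+first position for extras) via sorted().
import Mathlib
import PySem

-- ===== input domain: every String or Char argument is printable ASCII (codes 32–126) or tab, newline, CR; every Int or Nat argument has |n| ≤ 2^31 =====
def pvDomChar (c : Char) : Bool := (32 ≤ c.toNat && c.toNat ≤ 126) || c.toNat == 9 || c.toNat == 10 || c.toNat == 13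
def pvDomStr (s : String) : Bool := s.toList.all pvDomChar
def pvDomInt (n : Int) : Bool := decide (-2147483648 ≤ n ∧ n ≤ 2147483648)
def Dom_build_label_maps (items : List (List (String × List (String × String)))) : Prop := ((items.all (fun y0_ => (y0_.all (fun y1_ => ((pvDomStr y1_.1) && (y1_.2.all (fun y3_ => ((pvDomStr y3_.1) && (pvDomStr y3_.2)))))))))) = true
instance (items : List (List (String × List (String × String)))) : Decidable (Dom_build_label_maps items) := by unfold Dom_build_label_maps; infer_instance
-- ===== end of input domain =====

-- B replaces A's staged ordered/extras filtering and concatenation by one items pass that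
-- records each label's FIRST position, then a key-based sort per task (canonical rank, or
-- len(order)+first position for extras) — an order-by-computed-key algorithm (alternative).

-- shared module constants and the helper normalize_label (identical in both Python files)
def pvTasks : List String :=
  ["action_category", "posture", "intensity", "active_part", "trajectory"]

def pvTargetOrder : PySem.Dict String (List String) :=
  PySem.Dict.mk
    [("action_category", ["locomotion", "gesture", "exercise", "transition"]),
     ("posture", ["upright", "low_posture", "crouching", "bending"]),
     ("intensity", ["slow", "normal", "vigorous"]),
     ("active_part", ["full_body", "upper_body", "lower_body"]),
     ("trajectory", ["in_place", "forwards", "backwards", "lateral_move", "dynamic_turn"])]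

def pvNormalize (s : String) : String := PySem.Str.strip (PySem.Str.lower s)

-- labels.get(task, '') fed to normalize_label — the same subexpression in both Pythons
def pvLab (labels : List (String × String)) (task : String) : String :=
  pvNormalize ((PySem.Dict.mk labels).getD task "")

-- {label: idx for idx, label in enumerate(final_labels)} — the same comprehension in both Pythons
def pvEnumMap (finalLabels : List String) : List (String × Int) :=
  ((PySem.List.enumerate finalLabels).foldl
    (fun (d : PySem.Dict String Int) q => d.insert q.2 q.1) PySem.Dict.empty).items

-- ===== PORT A =====
-- body of A's inner 'for item in items' loop (state: (observed, seen))
def pvStepPair (task : String) (p : List String × PySem.Set String) (item : List (String × List (String × String))) : List String × PySem.Set String :=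
  let label := pvLab ((PySem.Dict.mk item).getD "labels" []) task
  if label ≠ "" ∧ ¬ PySem.Set.contains p.2 label then
    (p.1 ++ [label], PySem.Set.add p.2 label)
  else p

def build_label_maps (items : List (List (String × List (String × String)))) : List (String × List (String × Int)) :=
  (pvTasks.foldl
    (fun (label_maps : PySem.Dict String (List (String × Int))) task =>
      let p := items.foldl (pvStepPair task) ([], PySem.Set.empty)
      let ordered := (pvTargetOrder.getD task []).filter (fun l => PySem.Set.contains p.2 l)
      let extras := p.1.filter (fun l => ¬ ordered.contains l)
      label_maps.insert task (pvEnumMap (ordered ++ extras)))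
    PySem.Dict.empty).items

-- ===== PORT B =====
-- inner 'for task in TASKS' body of B's single enumerated items pass over the 'first' table
def pvTaskUpdB (pos : Int) (labels : List (String × String)) (tb : PySem.Dict String (PySem.Dict String Int)) (task : String) : PySem.Dict String (PySem.Dict String Int) :=
  let label := pvLab labels task
  if label ≠ "" ∧ (tb.getD task PySem.Dict.empty).get? label = none then
    tb.insert task ((tb.getD task PySem.Dict.empty).insert label pos)
  else tb

-- body of B's 'for pos, item in enumerate(items)' loop
def pvItemStepB (tb : PySem.Dict String (PySem.Dict String Int)) (q : Int × List (String × List (String × String))) : PySem.Dict String (PySem.Dict String Int) :=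
  pvTasks.foldl (pvTaskUpdB q.1 ((PySem.Dict.mk q.2).getD "labels" [])) tb

-- B's sort key: order.index(l) if l in order else len(order) + fp[l]
-- (fp[l] always hits an existing key; .getD 0 only totalizes the lookup)
def pvKeyB (order : List String) (fp : PySem.Dict String Int) (l : String) : Int :=
  if order.contains l then (((PySem.List.index? order l).getD 0 : Nat) : Int)
  else (order.length : Int) + (fp.get? l).getD 0

def build_label_maps_alt (items : List (List (String × List (String × String)))) : List (String × List (String × Int)) :=
  let init : PySem.Dict String (PySem.Dict String Int) :=
    pvTasks.foldl (fun d t => d.insert t PySem.Dict.empty) PySem.Dict.empty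
  let first := (PySem.List.enumerate items).foldl pvItemStepB init
  (pvTasks.foldl
    (fun (label_maps : PySem.Dict String (List (String × Int))) task =>
      let order := pvTargetOrder.getD task []
      let fp := first.getD task PySem.Dict.empty
      let final := PySem.List.sorted fp.keys (pvKeyB order fp) false
      label_maps.insert task (pvEnumMap final))
    PySem.Dict.empty).items

-- ===== PRECONDITION & SPEC =====
def Spec_build_label_maps (items : List (List (String × List (String × String)))) (out : List (String × List (String × Int))) : Prop := out = build_label_maps_alt items
instance (items : List (List (String × List (String × String)))) (out : List (String × List (String × Int))) : Decidable (Spec_build_label_maps items out) := by unfold Spec_build_label_maps; infer_instance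

-- ===== CLAIM (what is proved, stated in full; the proofs are below) =====
def Claim_equal_build_label_maps : Prop := ∀ (items : List (List (String × List (String × String)))), Dom_build_label_maps items → Spec_build_label_maps items (build_label_maps items)

-- ===== LEMMAS AND PROOFS =====

-- A's per-task scan of items, with the 'seen' set dropped (membership tested in 'observed')
def pvStepA (task : String) (obs : List String) (item : List (String × List (String × String))) : List String :=
  if pvLab ((PySem.Dict.mk item).getD "labels" []) task ≠ "" ∧ ¬ obs.contains (pvLab ((PySem.Dict.mk item).getD "labels" []) task)
  then obs ++ [pvLab ((PySem.Dict.mk item).getD "labels" []) task] else obs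

theorem pvStepPair_eq (task : String) (obs : List String) (item : List (String × List (String × String))) :
    pvStepPair task (obs, PySem.Set.ofList obs) item
      = (pvStepA task obs item, PySem.Set.ofList (pvStepA task obs item)) := by
  unfold pvStepPair pvStepA
  have hc : PySem.Set.contains (PySem.Set.ofList obs) (pvLab ((PySem.Dict.mk item).getD "labels" []) task)
      = obs.contains (pvLab ((PySem.Dict.mk item).getD "labels" []) task) := by
    simp [PySem.Set.contains, List.contains_eq_mem]
  simp only [hc]
  split_ifs with h
  · simp [PySem.Set.ofList_append_singleton]
  · rfl

-- A's inner fold carries (observed, seen) with seen = ofList observed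
theorem pvAinner (task : String) (items : List (List (String × List (String × String)))) :
    ∀ obs : List String,
      items.foldl (pvStepPair task) (obs, PySem.Set.ofList obs)
        = (items.foldl (pvStepA task) obs, PySem.Set.ofList (items.foldl (pvStepA task) obs)) := by
  induction items with
  | nil => intro obs; rfl
  | cons item rest ih =>
    intro obs
    rw [List.foldl_cons, List.foldl_cons, pvStepPair_eq]
    exact ih _

-- B's per-task step on the enumerated item (pos, item), acting on that task's slot
def pvStepB (task : String) (d : PySem.Dict String Int) (q : Int × List (String × List (String × String))) : PySem.Dict String Int :=
  if pvLab ((PySem.Dict.mk q.2).getD "labels" []) task ≠ "" ∧ d.get? (pvLab ((PySem.Dict.mk q.2).getD "labels" []) task) = none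
  then d.insert (pvLab ((PySem.Dict.mk q.2).getD "labels" []) task) q.1 else d

-- one enumerated item of B's pass, seen from one task's slot
theorem pvTblStepB (pos : Int) (labels : List (String × String)) (t : String) (ts : List String)
    (hnd : ts.Nodup) (tb : PySem.Dict String (PySem.Dict String Int)) :
    (ts.foldl (pvTaskUpdB pos labels) tb).getD t PySem.Dict.empty
      = if t ∈ ts then
          (let label := pvLab labels t
           if label ≠ "" ∧ (tb.getD t PySem.Dict.empty).get? label = none then
             (tb.getD t PySem.Dict.empty).insert label pos
           else tb.getD t PySem.Dict.empty)
        else tb.getD t PySem.Dict.empty := by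
  induction ts generalizing tb with
  | nil => simp
  | cons u rest ih =>
    rcases List.nodup_cons.mp hnd with ⟨hu, hrest⟩
    simp only [List.foldl_cons]
    by_cases htu : t = u
    · subst htu
      have hnotin : t ∉ rest := hu
      rw [ih hrest]
      simp only [if_neg hnotin, List.mem_cons, true_or, if_pos]
      unfold pvTaskUpdB
      by_cases hc : pvLab labels t ≠ "" ∧ ((tb.getD t PySem.Dict.empty).get? (pvLab labels t)) = none
      · simp only [if_pos hc, PySem.Dict.getD_insert_self]
      · simp only [if_neg hc]
    · have hkeep : (pvTaskUpdB pos labels tb u).getD t PySem.Dict.empty = tb.getD t PySem.Dict.empty := by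
        unfold pvTaskUpdB
        by_cases hc : pvLab labels u ≠ "" ∧ ((tb.getD u PySem.Dict.empty).get? (pvLab labels u)) = none
        · simp only [if_pos hc]; exact PySem.Dict.getD_insert_of_ne _ _ _ htu
        · simp only [if_neg hc]
      rw [ih hrest]
      by_cases hm : t ∈ rest
      · simp only [List.mem_cons, hm, or_true, if_pos, hkeep]
      · simp only [if_neg hm, hkeep, List.mem_cons]
        simp [htu, hm]

theorem pvTasks_nodup : pvTasks.Nodup := by decide

-- B's whole enumerated pass, seen from one task's slot, is the per-task pvStepB fold
theorem pvTableB (t : String) (ht : t ∈ pvTasks) (es : List (Int × List (String × List (String × String)))) :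
    ∀ tb : PySem.Dict String (PySem.Dict String Int),
      (es.foldl pvItemStepB tb).getD t PySem.Dict.empty
        = es.foldl (pvStepB t) (tb.getD t PySem.Dict.empty) := by
  induction es with
  | nil => intro tb; rfl
  | cons q rest ih =>
    intro tb
    simp only [List.foldl_cons]
    rw [ih]
    unfold pvItemStepB
    rw [pvTblStepB _ _ _ _ pvTasks_nodup, if_pos ht]
    rfl

-- the keys of B's per-task first-position dict evolve exactly as A's 'observed' list
theorem pvKeysB (t : String) (es : List (Int × List (String × List (String × String)))) :
    ∀ d : PySem.Dict String Int,
      (es.foldl (pvStepB t) d).keys = (es.map Prod.snd).foldl (pvStepA t) d.keys := by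
  induction es with
  | nil => intro d; rfl
  | cons q rest ih =>
    intro d
    simp only [List.foldl_cons, List.map_cons]
    have hstep : (pvStepB t d q).keys = pvStepA t d.keys q.2 := by
      unfold pvStepB pvStepA
      by_cases h1 : pvLab ((PySem.Dict.mk q.2).getD "labels" []) t ≠ ""
        ∧ d.get? (pvLab ((PySem.Dict.mk q.2).getD "labels" []) t) = none
      · have hmem : pvLab ((PySem.Dict.mk q.2).getD "labels" []) t ∉ d.keys :=
          (PySem.Dict.get?_eq_none_iff_not_mem_keys _ _).mp h1.2
        have hcontains : d.contains (pvLab ((PySem.Dict.mk q.2).getD "labels" []) t) = false := by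
          rw [PySem.Dict.contains_eq_isSome_get?, h1.2]; rfl
        rw [if_pos h1, if_pos ⟨h1.1, by simpa [List.contains_eq_mem] using hmem⟩]
        exact PySem.Dict.keys_insert_of_not_contains _ _ hcontains
      · rw [if_neg h1]
        have h2 : ¬ (pvLab ((PySem.Dict.mk q.2).getD "labels" []) t ≠ ""
            ∧ ¬ (d.keys.contains (pvLab ((PySem.Dict.mk q.2).getD "labels" []) t) = true)) := by
          intro hcon
          apply h1
          refine ⟨hcon.1, ?_⟩
          rw [PySem.Dict.get?_eq_none_iff_not_mem_keys]
          intro hm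
          exact hcon.2 (by simpa [List.contains_eq_mem] using hm)
        rw [if_neg h2]
    rw [ih (pvStepB t d q), hstep]

-- invariant of B's per-task fold: keys nodup, stored first positions strictly
-- increasing in insertion order, all in [0, lo)
def pvInvB (d : PySem.Dict String Int) (lo : Int) : Prop :=
  d.keys.Nodup ∧ d.keys.Pairwise (fun a b => d.getD a 0 < d.getD b 0)
    ∧ ∀ a ∈ d.keys, 0 ≤ d.getD a 0 ∧ d.getD a 0 < lo

theorem pvInvB_step (t : String) (q : Int × List (String × List (String × String)))
    (d : PySem.Dict String Int) (lo : Int) (hlo : lo ≤ q.1) (h0 : 0 ≤ q.1)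
    (h : pvInvB d lo) : pvInvB (pvStepB t d q) (q.1 + 1) := by
  obtain ⟨hnd, hpw, hbd⟩ := h
  unfold pvStepB
  by_cases hc : pvLab ((PySem.Dict.mk q.2).getD "labels" []) t ≠ ""
      ∧ d.get? (pvLab ((PySem.Dict.mk q.2).getD "labels" []) t) = none
  · set lab := pvLab ((PySem.Dict.mk q.2).getD "labels" []) t with hlab
    rw [if_pos hc]
    have hmem : lab ∉ d.keys := (PySem.Dict.get?_eq_none_iff_not_mem_keys _ _).mp hc.2
    have hcontains : d.contains lab = false := by
      rw [PySem.Dict.contains_eq_isSome_get?, hc.2]; rfl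
    have hkeys : (d.insert lab q.1).keys = d.keys ++ [lab] :=
      PySem.Dict.keys_insert_of_not_contains _ _ hcontains
    have hgetD : ∀ a ∈ d.keys, (d.insert lab q.1).getD a 0 = d.getD a 0 := by
      intro a ha
      exact PySem.Dict.getD_insert_of_ne _ _ _ (fun he => hmem (he ▸ ha))
    refine ⟨?_, ?_, ?_⟩
    · rw [hkeys]
      refine List.Nodup.append hnd (List.nodup_singleton _) ?_
      intro a ha hb
      rw [List.mem_singleton] at hb
      subst hb
      exact hmem ha
    · rw [hkeys, List.pairwise_append]
      refine ⟨?_, by simp, ?_⟩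
      · exact List.Pairwise.imp_of_mem (fun ha hb hr => by rw [hgetD _ ha, hgetD _ hb]; exact hr) hpw
      · intro a ha b hb
        simp only [List.mem_singleton] at hb
        subst hb
        rw [hgetD _ ha, PySem.Dict.getD_insert_self]
        exact lt_of_lt_of_le (hbd a ha).2 hlo
    · intro a ha
      rw [hkeys, List.mem_append] at ha
      rcases ha with ha | ha
      · rw [hgetD _ ha]
        exact ⟨(hbd a ha).1, by linarith [(hbd a ha).2]⟩
      · simp only [List.mem_singleton] at ha
        subst ha
        rw [PySem.Dict.getD_insert_self]
        omega
  · rw [if_neg hc]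
    refine ⟨hnd, hpw, fun a ha => ⟨(hbd a ha).1, by linarith [(hbd a ha).2]⟩⟩

theorem pvInvB_fold (t : String) (items : List (List (String × List (String × String)))) :
    ∀ (n : Int) (d : PySem.Dict String Int), 0 ≤ n → pvInvB d n →
      pvInvB ((PySem.List.enumerate items n).foldl (pvStepB t) d) (n + items.length) := by
  induction items with
  | nil => intro n d _ h; simpa using h
  | cons item rest ih =>
    intro n d hn h
    rw [PySem.List.enumerate_cons, List.foldl_cons]
    have := ih (n + 1) (pvStepB t d (n, item)) (by omega)
      (pvInvB_step t (n, item) d n le_rfl hn h)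
    simpa [add_comm, add_assoc, add_left_comm] using this

theorem pvInvB_empty : pvInvB PySem.Dict.empty 0 := by
  refine ⟨by simp, by simp, by simp⟩

-- the initial table {t: {} for t in TASKS} answers the empty dict at the five tasks
theorem pvInitB_getD (t : String) (ht : t ∈ pvTasks) :
    ((pvTasks.foldl (fun (d : PySem.Dict String (PySem.Dict String Int)) t => d.insert t PySem.Dict.empty) PySem.Dict.empty).getD t PySem.Dict.empty) = PySem.Dict.empty := by
  fin_cases ht <;> decide

-- both outer constructions over the five distinct tasks produce the assoc list in task order
theorem pvFoldInsertItems {V : Type} (f : String → V) :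
    (pvTasks.foldl (fun (d : PySem.Dict String V) t => d.insert t (f t)) PySem.Dict.empty).items
      = pvTasks.map (fun t => (t, f t)) := by
  simp [pvTasks, PySem.Dict.insert, PySem.Dict.empty]

-- facts about each literal target list, checked by computation
theorem pvOrderFacts (t : String) (ht : t ∈ pvTasks) :
    (pvTargetOrder.getD t []).Nodup
    ∧ (pvTargetOrder.getD t []).Pairwise (fun a b =>
        (((PySem.List.index? (pvTargetOrder.getD t []) a).getD 0 : Nat) : Int)
          < (((PySem.List.index? (pvTargetOrder.getD t []) b).getD 0 : Nat) : Int))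
    ∧ ∀ a ∈ pvTargetOrder.getD t [],
        (((PySem.List.index? (pvTargetOrder.getD t []) a).getD 0 : Nat) : Int)
          < ((pvTargetOrder.getD t []).length : Int) := by
  fin_cases ht <;> refine ⟨by decide, by decide, by decide⟩

-- the per-task heart: B's key-sort of the first-position dict's keys IS A's ordered ++ extras
theorem pvSortedEq (order : List String) (fp : PySem.Dict String Int)
    (observed : List String) (m : Int)
    (hkeys : fp.keys = observed)
    (hinv : pvInvB fp m)
    (hondn : order.Nodup)
    (hopw : order.Pairwise (fun a b =>
        (((PySem.List.index? order a).getD 0 : Nat) : Int) < (((PySem.List.index? order b).getD 0 : Nat) : Int)))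
    (hobnd : ∀ a ∈ order, (((PySem.List.index? order a).getD 0 : Nat) : Int) < (order.length : Int)) :
    PySem.List.sorted fp.keys (pvKeyB order fp) false
      = (order.filter (fun l => observed.contains l))
        ++ (observed.filter (fun l => ¬ (order.filter (fun l' => observed.contains l')).contains l)) := by
  obtain ⟨hnd, hpw, hbd⟩ := hinv
  rw [hkeys] at hnd hpw hbd
  set ordered := order.filter (fun l => observed.contains l) with hord
  set extras := observed.filter (fun l => ¬ ordered.contains l) with hext
  have hmem_ordered : ∀ l, l ∈ ordered ↔ l ∈ order ∧ l ∈ observed := by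
    intro l; simp [hord, List.mem_filter, List.contains_eq_mem]
  have hext2 : extras = observed.filter (fun l => !(order.contains l)) := by
    rw [hext]
    apply List.filter_congr
    intro l hl
    have hiff : (l ∈ ordered) ↔ (l ∈ order) :=
      ⟨fun h => ((hmem_ordered l).mp h).1, fun h => (hmem_ordered l).mpr ⟨h, hl⟩⟩
    simp [List.contains_eq_mem, hiff]
  -- permutation: ordered ++ extras is a rearrangement of observed = fp.keys
  have h1 : ordered.Perm (observed.filter (fun l => order.contains l)) := by
    apply (List.perm_ext_iff_of_nodup (List.Nodup.filter _ hondn) (List.Nodup.filter _ hnd)).mpr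
    intro a
    simp [List.mem_filter, List.contains_eq_mem, and_comm]
  have hperm : (ordered ++ extras).Perm observed := by
    rw [hext2]
    exact (h1.append_right _).trans (List.filter_append_perm _ observed)
  -- key values on the two blocks
  have hkey_ord : ∀ l ∈ ordered, pvKeyB order fp l = (((PySem.List.index? order l).getD 0 : Nat) : Int) := by
    intro l hl
    have hmo : l ∈ order := ((hmem_ordered l).mp hl).1
    simp [pvKeyB, List.contains_eq_mem, hmo]
  have hkey_ext : ∀ l ∈ extras, pvKeyB order fp l = (order.length : Int) + fp.getD l 0 := by
    intro l hl
    rw [hext2] at hl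
    have hno : l ∉ order := by
      have := (List.mem_filter.mp hl).2
      simpa [List.contains_eq_mem] using this
    simp [pvKeyB, List.contains_eq_mem, hno, PySem.Dict.getD_eq_get?_getD]
  -- strict key increase along ordered ++ extras
  have hpair : (ordered ++ extras).Pairwise (fun a b => pvKeyB order fp a < pvKeyB order fp b) := by
    rw [List.pairwise_append]
    refine ⟨?_, ?_, ?_⟩
    · have hsub : ordered.Sublist order := List.filter_sublist
      have := List.Pairwise.sublist hsub hopw
      exact List.Pairwise.imp_of_mem
        (fun ha hb hr => by rw [hkey_ord _ ha, hkey_ord _ hb]; exact hr) this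
    · have hsub : extras.Sublist observed := List.filter_sublist
      have := List.Pairwise.sublist hsub hpw
      exact List.Pairwise.imp_of_mem
        (fun ha hb hr => by rw [hkey_ext _ ha, hkey_ext _ hb]; omega) this
    · intro a ha b hb
      have hma : a ∈ order := ((hmem_ordered a).mp ha).1
      have hmb : b ∈ observed := (List.mem_filter.mp (hext ▸ hb)).1
      rw [hkey_ord _ ha, hkey_ext _ hb]
      have h1 := hobnd a hma
      have h2 := (hbd b hmb).1
      omega
  have hperm' : (ordered ++ extras).Perm fp.keys := hkeys ▸ hperm
  exact PySem.List.sorted_eq_of_perm_of_pairwise_lt _ _ _ hperm' hpair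

-- ===== VERDICT (by name: the statement is the Claim_ definition above) =====
theorem build_label_maps_spec : Claim_equal_build_label_maps := by
  intro items _
  unfold Spec_build_label_maps build_label_maps build_label_maps_alt
  rw [pvFoldInsertItems, pvFoldInsertItems]
  apply List.map_congr_left
  intro t ht
  refine congrArg _ (congrArg _ ?_)
  -- A side: unfold the (observed, seen) pair
  have hA : items.foldl (pvStepPair t) ([], PySem.Set.empty)
      = (items.foldl (pvStepA t) [], PySem.Set.ofList (items.foldl (pvStepA t) [])) := pvAinner t items []
  set observed := items.foldl (pvStepA t) [] with hobs
  -- B side: extract the per-task slot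
  set fp := ((PySem.List.enumerate items).foldl pvItemStepB
      (pvTasks.foldl (fun (d : PySem.Dict String (PySem.Dict String Int)) t => d.insert t PySem.Dict.empty) PySem.Dict.empty)).getD t PySem.Dict.empty with hfp
  have hfp2 : fp = (PySem.List.enumerate items).foldl (pvStepB t) PySem.Dict.empty := by
    rw [hfp, pvTableB t ht, pvInitB_getD t ht]
  have hkeys : fp.keys = observed := by
    rw [hfp2, pvKeysB, PySem.List.map_snd_enumerate]
    rfl
  have hinv : pvInvB fp ((0 : Int) + items.length) := by
    rw [hfp2]
    exact pvInvB_fold t items 0 PySem.Dict.empty le_rfl pvInvB_empty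
  obtain ⟨hondn, hopw, hobnd⟩ := pvOrderFacts t ht
  have hsorted := pvSortedEq (pvTargetOrder.getD t []) fp observed _ hkeys hinv hondn hopw hobnd
  rw [hA]
  have hcontains : ∀ l, PySem.Set.contains (PySem.Set.ofList observed) l = observed.contains l := by
    intro l; simp [PySem.Set.contains, List.contains_eq_mem]
  simp only [hcontains]
  rw [← hsorted]
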